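-- pv_equiv track=rewrite | github.com/aidnem/collver | test.py | eat_chunk
-- ===== SOURCE A (Python) =====
-- def eat_chunk(rlines: list[str]) -> str:
--     """Eat a chunk of lines until the next [!MARKER]"""
--     out = ""
--     if len(rlines):
--         line = rlines.pop()
--     else:
--         return out
--
--     while len(rlines) and not line.startswith("[!"):
--         out += line
--         line = rlines.pop()
--
--     if line.startswith("[!"):
--         rlines.append(line)
--     else:
--         out += line
--
--     return out
-- ===== SOURCE B (Python) =====
-- def eat_chunk(rlines: list[str]) -> str:
--     """Eat a chunk of lines until the next [!MARKER]"""
--     # Count how many lines from the top of the stack (end of list) precede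
--     # the first marker, then build the output with one bulk slice+join and
--     # truncate the list in place (same mutation as the original).
--     tail_len = 0
--     for line in reversed(rlines):
--         if line.startswith("[!"):
--             break
--         tail_len += 1
--     cut = len(rlines) - tail_len
--     out = "".join(reversed(rlines[cut:]))
--     del rlines[cut:]
--     return out
-- ===== Notes on version B (the rewrite author's own statement) =====
-- stated objective: faster
-- what changed: Replaces the interleaved pop-and-accumulate loop (repeated string += and list.pop) with a two-phase plan: first locate the boundary index of the first marker scanning from the end, then produce the result with one bulk slice/reverse/join and one bulk del; both mutate rlines identically.
import Mathlib
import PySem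

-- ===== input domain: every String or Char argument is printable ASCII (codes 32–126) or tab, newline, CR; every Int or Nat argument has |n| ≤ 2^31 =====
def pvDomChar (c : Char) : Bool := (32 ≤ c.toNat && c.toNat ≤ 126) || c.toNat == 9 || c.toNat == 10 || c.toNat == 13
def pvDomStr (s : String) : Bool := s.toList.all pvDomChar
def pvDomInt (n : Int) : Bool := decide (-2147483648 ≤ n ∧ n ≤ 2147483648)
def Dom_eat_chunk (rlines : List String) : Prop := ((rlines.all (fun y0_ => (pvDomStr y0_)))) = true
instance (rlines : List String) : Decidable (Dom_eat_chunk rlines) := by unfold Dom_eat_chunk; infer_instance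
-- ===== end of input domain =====

-- B replaces A's interleaved pop/accumulate loop (repeated string +=) by a boundary scan
-- plus one bulk slice/reverse/join (objective: faster; a timing run measured it). Both
-- Pythons truncate rlines in place identically; the equivalence proved is about the return value.

-- ===== PORT A =====
-- while-loop of A: state (rlines, line, out); pop from the end = getLast/dropLast
def eat_chunk_loop (rlines : List String) (line out : String) : String :=
  if h : rlines ≠ [] ∧ PySem.Str.startswith line "[!" = false then
    eat_chunk_loop rlines.dropLast (rlines.getLast h.1) (out ++ line)
  else if PySem.Str.startswith line "[!" then
    out   -- rlines.append(line): mutation only, return value is out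
  else
    out ++ line
termination_by rlines.length
decreasing_by
  cases rlines with
  | nil => exact absurd rfl h.1
  | cons a l => simp

def eat_chunk (rlines : List String) : String :=
  if h : rlines ≠ [] then
    eat_chunk_loop rlines.dropLast (rlines.getLast h) ""
  else
    ""

-- ===== PORT B =====
def pvTailLen : List String → Nat
  | [] => 0
  | l :: ls => if PySem.Str.startswith l "[!" then 0 else pvTailLen ls + 1

def eat_chunk_alt (rlines : List String) : String :=
  PySem.Str.join "" (rlines.drop (rlines.length - pvTailLen rlines.reverse)).reverse

-- ===== PRECONDITION & SPEC =====
def Spec_eat_chunk (rlines : List String) (out : String) : Prop := out = eat_chunk_alt rlines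
instance (rlines : List String) (out : String) : Decidable (Spec_eat_chunk rlines out) := by unfold Spec_eat_chunk; infer_instance

-- ===== CLAIM (what is proved, stated in full; the proofs are below) =====
def Claim_equal_eat_chunk : Prop := ∀ (rlines : List String), Dom_eat_chunk rlines → Spec_eat_chunk rlines (eat_chunk rlines)

-- ===== LEMMAS AND PROOFS =====

-- reference value: concatenation of the reversed list up to (excluding) the first marker
def pvChunk : List String → String
  | [] => ""
  | l :: ls => if PySem.Str.startswith l "[!" then "" else l ++ pvChunk ls

theorem str_join_empty_nil : PySem.Str.join "" [] = "" := by
  simp [PySem.Str.join, PySem.Chars.join_nil]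

theorem str_join_empty_cons (x : String) (l : List String) :
    PySem.Str.join "" (x :: l) = x ++ PySem.Str.join "" l := by
  cases l with
  | nil => simp [PySem.Str.join, PySem.Chars.join_singleton, PySem.Chars.join_nil]
  | cons y ys => simp [PySem.Str.join, PySem.Chars.join_cons_cons]

theorem eat_chunk_loop_eq (ys : List String) : ∀ (line out : String),
    eat_chunk_loop ys.reverse line out =
      if PySem.Str.startswith line "[!" then out else out ++ line ++ pvChunk ys := by
  induction ys with
  | nil =>
    intro line out
    rw [eat_chunk_loop, dif_neg (by simp)]
    by_cases hm : PySem.Str.startswith line "[!" = true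
    · rw [if_pos hm, if_pos hm]
    · rw [if_neg hm, if_neg hm]
      simp only [pvChunk, String.append_empty]
  | cons y ys ih =>
    intro line out
    rw [eat_chunk_loop]
    by_cases hm : PySem.Str.startswith line "[!" = true
    · rw [dif_neg (by rintro ⟨-, hf⟩; rw [hm] at hf; simp at hf), if_pos hm, if_pos hm]
    · have hm' : PySem.Str.startswith line "[!" = false := Bool.eq_false_iff.mpr hm
      rw [List.reverse_cons, dif_pos ⟨by simp, hm'⟩, List.dropLast_concat, List.getLast_concat, ih]
      by_cases h2 : PySem.Str.startswith y "[!" = true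
      · rw [if_pos h2, if_neg hm]
        simp only [pvChunk]
        rw [if_pos h2, String.append_empty]
      · rw [if_neg h2, if_neg hm]
        simp only [pvChunk]
        rw [if_neg h2, String.append_assoc]

theorem eat_chunk_eq (rlines : List String) : eat_chunk rlines = pvChunk rlines.reverse := by
  unfold eat_chunk
  rcases h : rlines.reverse with _ | ⟨line, rest⟩
  · have h0 : rlines = [] := by simpa using congrArg List.reverse h
    simp [h0, pvChunk]
  · have hr : rlines = rest.reverse ++ [line] := by
      have := congrArg List.reverse h
      simpa using this
    subst hr
    rw [dif_pos (by simp), List.dropLast_concat, List.getLast_concat, eat_chunk_loop_eq]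
    by_cases hm : PySem.Str.startswith line "[!" = true
    · rw [if_pos hm]
      simp only [pvChunk]
      rw [if_pos hm]
    · rw [if_neg hm]
      simp only [pvChunk]
      rw [if_neg hm, String.empty_append]

theorem join_take_eq (xs : List String) :
    PySem.Str.join "" (xs.take (pvTailLen xs)) = pvChunk xs := by
  induction xs with
  | nil =>
    simp only [pvTailLen, pvChunk, List.take_nil]
    exact str_join_empty_nil
  | cons x xs ih =>
    simp only [pvTailLen, pvChunk]
    by_cases h : PySem.Str.startswith x "[!" = true
    · rw [if_pos h, if_pos h, List.take_zero]
      exact str_join_empty_nil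
    · rw [if_neg h, if_neg h, List.take_succ_cons, str_join_empty_cons, ih]

theorem eat_chunk_alt_eq (rlines : List String) :
    eat_chunk_alt rlines = pvChunk rlines.reverse := by
  unfold eat_chunk_alt
  rw [← List.take_reverse, join_take_eq]

-- ===== VERDICT (by name: the statement is the Claim_ definition above) =====
theorem eat_chunk_spec : Claim_equal_eat_chunk := by
  intro rlines _
  unfold Spec_eat_chunk
  rw [eat_chunk_eq, eat_chunk_alt_eq]
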